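-- pv_equiv track=rewrite | github.com/hungngocphat01/discord-bot-minalinsky | main.py | differenceBetween
-- ===== SOURCE A (Python) =====
-- def differenceBetween(str1, str2):
--     diff = 0
--     if len(str1) > len(str2):
--         for char1 in str1:
--             for char2 in str2:
--                 if char1 != char2: diff += 1
--     else:
--         for char2 in str2:
--             for char1 in str1:
--                 if char1 != char2: diff += 1
--     return diff
-- ===== SOURCE B (Python) =====
-- def differenceBetween(str1, str2):
--     c1 = {}
--     for ch in str1:
--         c1[ch] = c1.get(ch, 0) + 1
--     c2 = {}
--     for ch in str2:
--         c2[ch] = c2.get(ch, 0) + 1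
--     equal = 0
--     for ch, n in c1.items():
--         equal += n * c2.get(ch, 0)
--     return len(str1) * len(str2) - equal
-- ===== Notes on version B (the rewrite author's own statement) =====
-- stated objective: faster
-- what changed: Replaced A's nested all-pairs character comparison with two frequency dictionaries and the closed form len1*len2 - sum(count1[c]*count2[c]).
import Mathlib
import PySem

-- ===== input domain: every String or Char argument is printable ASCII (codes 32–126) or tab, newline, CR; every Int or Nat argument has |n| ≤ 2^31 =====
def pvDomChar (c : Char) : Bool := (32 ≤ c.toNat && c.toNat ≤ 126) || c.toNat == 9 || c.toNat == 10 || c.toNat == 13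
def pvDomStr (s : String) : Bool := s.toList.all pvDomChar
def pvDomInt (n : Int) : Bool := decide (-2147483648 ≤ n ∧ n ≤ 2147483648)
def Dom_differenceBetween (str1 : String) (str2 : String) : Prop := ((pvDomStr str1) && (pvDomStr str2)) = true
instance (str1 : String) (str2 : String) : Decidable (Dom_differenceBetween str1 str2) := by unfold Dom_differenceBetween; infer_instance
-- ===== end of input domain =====

-- B replaces A's nested all-pairs loop by two character-frequency dictionaries and the
-- closed form len1*len2 - Σ count1[c]*count2[c]; objective: faster (O(n*m) → O(n+m)).

-- ===== PORT A =====
def differenceBetween (str1 : String) (str2 : String) : Int :=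
  let diff : Int := 0
  if PySem.Str.len str1 > PySem.Str.len str2 then
    str1.toList.foldl (fun diff char1 =>
      str2.toList.foldl (fun diff char2 =>
        if char1 != char2 then diff + 1 else diff) diff) diff
  else
    str2.toList.foldl (fun diff char2 =>
      str1.toList.foldl (fun diff char1 =>
        if char1 != char2 then diff + 1 else diff) diff) diff

-- ===== PORT B =====
-- for ch in s: c[ch] = c.get(ch, 0) + 1
def pvFreq (l : List Char) : PySem.Dict Char Int :=
  l.foldl (fun d ch => d.insert ch (d.getD ch 0 + 1)) PySem.Dict.empty

def differenceBetween_alt (str1 : String) (str2 : String) : Int :=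
  let c1 := pvFreq str1.toList
  let c2 := pvFreq str2.toList
  let equal := c1.items.foldl (fun equal p => equal + p.2 * c2.getD p.1 0) 0
  PySem.Str.len str1 * PySem.Str.len str2 - equal

-- ===== PRECONDITION & SPEC =====
def Spec_differenceBetween (str1 : String) (str2 : String) (out : Int) : Prop := out = differenceBetween_alt str1 str2
instance (str1 : String) (str2 : String) (out : Int) : Decidable (Spec_differenceBetween str1 str2 out) := by unfold Spec_differenceBetween; infer_instance

-- ===== CLAIM (what is proved, stated in full; the proofs are below) =====
def Claim_equal_differenceBetween : Prop := ∀ (str1 : String) (str2 : String), Dom_differenceBetween str1 str2 → Spec_differenceBetween str1 str2 (differenceBetween str1 str2)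

-- ===== LEMMAS AND PROOFS =====

theorem pv_sum_map_neg (la : List Char) (f : Char → Int) :
    (la.map (fun c => -(f c))).sum = -((la.map f).sum) := by
  induction la with
  | nil => simp
  | cons a t ih => simp [ih, add_comm]

-- Σ_{c∈l} (if a = c then 1 else 0) = count a l
theorem pv_sum_indicator (a : Char) (l : List Char) :
    (l.map (fun c => if a = c then (1 : Int) else 0)).sum = (l.count a : Int) := by
  induction l with
  | nil => simp
  | cons b u ih =>
    by_cases hab : a = b
    · subst hab
      simp only [List.map_cons, List.sum_cons, ih, List.count_cons, beq_self_eq_true, if_true]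
      push_cast; omega
    · have hba : (b == a) = false := by simp [Ne.symm hab]
      simp [List.count_cons, hba, hab, ih]

-- Σ_{k∈S} (if a = k then f k else 0) = f a when S has no duplicates and contains a
theorem pv_sum_ite_single (f : Char → Int) (S : List Char) (a : Char)
    (hnd : S.Nodup) (ha : a ∈ S) :
    (S.map (fun k => if a = k then f k else 0)).sum = f a := by
  induction S with
  | nil => cases ha
  | cons b T ih =>
    rcases List.mem_cons.mp ha with h | h
    · subst h
      have hnotin : a ∉ T := (List.nodup_cons.mp hnd).1
      have : (T.map (fun k => if a = k then f k else 0)).sum = 0 := by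
        apply List.sum_eq_zero
        intro x hx
        rcases List.mem_map.mp hx with ⟨k, hk, rfl⟩
        have : a ≠ k := fun h => hnotin (h ▸ hk)
        simp [this]
      simp [this]
    · have hab : a ≠ b := fun he => (List.nodup_cons.mp hnd).1 (he ▸ h)
      simp [hab, ih (List.nodup_cons.mp hnd).2 h]

-- grouping: summing f over l equals summing count(k)·f(k) over any nodup superset of l's elements
theorem pv_group_sum (f : Char → Int) (S : List Char) (hnd : S.Nodup) :
    ∀ (l : List Char), (∀ x ∈ l, x ∈ S) →
      (S.map (fun k => (l.count k : Int) * f k)).sum = (l.map f).sum := by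
  intro l
  induction l with
  | nil => intro _; simp
  | cons a t ih =>
    intro hsub
    have hstep : (S.map (fun k => ((a :: t).count k : Int) * f k)).sum
        = (S.map (fun k => (t.count k : Int) * f k)).sum
          + (S.map (fun k => if a = k then f k else 0)).sum := by
      rw [← PySem.List.sum_map_add_int]
      apply congrArg
      apply List.map_congr_left
      intro k _
      by_cases hak : a = k
      · subst hak; simp; ring
      · simp [hak]
    rw [hstep, pv_sum_ite_single f S a hnd (hsub a (List.mem_cons_self)),
        ih (fun x hx => hsub x (List.mem_cons_of_mem a hx))]
    simp [add_comm]

-- symmetry of the pair count: Σ_{c∈l1} count(c,l2) = Σ_{c∈l2} count(c,l1)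
theorem pv_count_symm (l1 l2 : List Char) :
    (l1.map (fun c => (l2.count c : Int))).sum = (l2.map (fun c => (l1.count c : Int))).sum := by
  induction l1 with
  | nil => simp
  | cons a t ih =>
    have h2 : (l2.map (fun c => ((a :: t).count c : Int))).sum
        = (l2.map (fun c => (t.count c : Int))).sum
          + (l2.map (fun c => if a = c then (1 : Int) else 0)).sum := by
      rw [← PySem.List.sum_map_add_int]
      apply congrArg
      apply List.map_congr_left
      intro c _
      by_cases hac : a = c
      · subst hac; simp
      · simp [hac]
    simp only [List.map_cons, List.sum_cons, h2, ih, pv_sum_indicator]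
    omega

-- A's inner loop over l counts the characters of l different from c
theorem pv_inner (c : Char) (l : List Char) (d : Int) :
    l.foldl (fun diff x => if c != x then diff + 1 else diff) d
      = d + (l.length : Int) - (l.count c : Int) := by
  rw [PySem.List.foldl_if_add_one (fun x => c != x) l d]
  have h1 : l.countP (fun x => c != x) + l.count c = l.length := by
    have e : l.count c = l.countP (fun x => x == c) := rfl
    have h2 := List.length_eq_countP_add_countP (l := l) (p := fun x => x == c)
    have h3 : l.countP (fun x => c != x) = l.countP (fun a => decide ¬((a == c) = true)) := by
      apply List.countP_congr
      intro x _
      by_cases hxc : x = c <;> simp [hxc, bne, Ne.symm]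
    omega
  omega

-- both branches of A equal |l1|·|l2| − Σ_{c∈l1} count(c,l2)
theorem pv_A_eq (str1 str2 : String) :
    differenceBetween str1 str2
      = (str1.toList.length : Int) * (str2.toList.length : Int)
        - (str1.toList.map (fun c => (str2.toList.count c : Int))).sum := by
  unfold differenceBetween
  set l1 := str1.toList
  set l2 := str2.toList
  have branch : ∀ (la lb : List Char),
      la.foldl (fun diff c1 => lb.foldl (fun diff c2 => if c1 != c2 then diff + 1 else diff) diff) 0
        = (la.length : Int) * (lb.length : Int) - (la.map (fun c => (lb.count c : Int))).sum := by
    intro la lb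
    have h1 : la.foldl (fun diff c1 => lb.foldl (fun diff c2 => if c1 != c2 then diff + 1 else diff) diff) 0
        = la.foldl (fun diff c1 => diff + ((lb.length : Int) - (lb.count c1 : Int))) 0 := by
      apply PySem.List.foldl_congr_mem'
      intro c1 _ acc
      rw [pv_inner c1 lb acc]
      ring
    rw [h1, PySem.List.foldl_add la (fun c1 => (lb.length : Int) - (lb.count c1 : Int)) 0]
    have h2 : (la.map (fun c1 => (lb.length : Int) - (lb.count c1 : Int))).sum
        = (la.map (fun _ => (lb.length : Int))).sum + (la.map (fun c1 => -(lb.count c1 : Int))).sum := by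
      rw [← PySem.List.sum_map_add_int]
      apply congrArg; apply List.map_congr_left; intro c _; ring
    have h3 := pv_sum_map_neg la (fun c1 => (lb.count c1 : Int))
    rw [h2, h3, PySem.List.sum_map_const_int]
    ring
  by_cases hlen : PySem.Str.len str1 > PySem.Str.len str2
  · simp only [hlen, if_true]
    exact branch l1 l2
  · simp only [hlen, if_false]
    have hswap : l2.foldl (fun (diff : Int) char2 =>
          l1.foldl (fun diff char1 => if char1 != char2 then diff + 1 else diff) diff) (0 : Int)
        = l2.foldl (fun (diff : Int) char2 =>
          l1.foldl (fun diff char1 => if char2 != char1 then diff + 1 else diff) diff) (0 : Int) := by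
      apply PySem.List.foldl_congr_mem'
      intro c2 _ acc
      apply PySem.List.foldl_congr_mem'
      intro c1 _ acc'
      rw [bne_comm]
    refine hswap.trans ?_
    rw [branch l2 l1, pv_count_symm l2 l1]
    ring

-- B equals the same closed form
theorem pv_B_eq (str1 str2 : String) :
    differenceBetween_alt str1 str2
      = (str1.toList.length : Int) * (str2.toList.length : Int)
        - (str1.toList.map (fun c => (str2.toList.count c : Int))).sum := by
  simp only [differenceBetween_alt, pvFreq]
  set l1 := str1.toList
  set l2 := str2.toList
  rw [PySem.Dict.foldl_insert_getD_add_one_eq_counter l1,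
      PySem.Dict.foldl_insert_getD_add_one_eq_counter l2]
  have heq : (PySem.Dict.counter l1).items.foldl
      (fun equal p => equal + p.2 * (PySem.Dict.counter l2).getD p.1 0) 0
      = (l1.map (fun c => (l2.count c : Int))).sum := by
    rw [PySem.List.foldl_add ((PySem.Dict.counter l1).items)
        (fun p => p.2 * (PySem.Dict.counter l2).getD p.1 0) 0]
    rw [PySem.Dict.items_counter l1]
    have : ((PySem.Set.ofList l1).map (fun k => (k, (l1.count k : Int)))).map
          (fun p => p.2 * (PySem.Dict.counter l2).getD p.1 0)
        = (PySem.Set.ofList l1).map (fun k => (l1.count k : Int) * (l2.count k : Int)) := by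
      rw [List.map_map]
      apply List.map_congr_left
      intro k _
      simp [PySem.Dict.getD_counter]
    rw [this, pv_group_sum (fun c => (l2.count c : Int)) (PySem.Set.ofList l1)
          (PySem.Set.nodup_ofList l1) l1 (fun x hx => (PySem.Set.mem_ofList l1 x).mpr hx)]
    ring
  rw [heq, PySem.Str.len_eq, PySem.Str.len_eq]


-- ===== VERDICT (by name: the statement is the Claim_ definition above) =====
theorem differenceBetween_spec : Claim_equal_differenceBetween := by
  intro str1 str2 _
  unfold Spec_differenceBetween
  rw [pv_A_eq, pv_B_eq]
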